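-- pv_equiv track=rewrite | github.com/derlin-asp/Random_Python_Scripts | zip.py | solution
-- ===== SOURCE A (Python) =====
-- def solution(A):
--     # write your code in Python 3.6
--     A = list(str(A))
--     # copy array and reverse it
--     B = A[::-1]
--
--     C = []
--     x = 0
--     while ( len(C) < len(A) ):
--         C.append(A[x])
--         if len(C) < len(A):
--             C.append(B[x])
--         x = x + 1
--     s = [str(i) for i in C]
--     C = int("".join(s))
--     return C
-- ===== SOURCE B (Python) =====
-- def solution(A):
--     def riffle(s):
--         if len(s) <= 1:
--             return s
--         return s[0] + s[-1] + riffle(s[1:-1])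
--     return int(riffle(str(A)))
-- ===== Notes on version B (the rewrite author's own statement) =====
-- stated objective: alternative
-- what changed: Replaces A's iterative index-walk that appends from the string and a pre-built reversed copy until the output reaches full length by a recursion that peels the first and last character off the string and recurses on the middle slice, with no reversed copy, no index counter and no length test against a growing output.
import Mathlib
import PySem

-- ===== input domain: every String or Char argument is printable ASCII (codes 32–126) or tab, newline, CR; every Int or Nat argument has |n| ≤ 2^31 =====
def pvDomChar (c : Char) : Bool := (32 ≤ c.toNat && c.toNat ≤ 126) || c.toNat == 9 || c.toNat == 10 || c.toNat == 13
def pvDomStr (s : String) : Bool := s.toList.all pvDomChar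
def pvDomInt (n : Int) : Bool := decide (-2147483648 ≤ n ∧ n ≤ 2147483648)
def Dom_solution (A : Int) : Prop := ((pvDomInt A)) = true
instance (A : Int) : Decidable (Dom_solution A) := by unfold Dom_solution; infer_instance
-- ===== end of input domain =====

-- B recurses on the string, peeling the first and last character and recursing on the
-- middle slice, instead of A's while loop over an index into the string and a pre-built
-- reversed copy. Same result, different decomposition (recursive vs iterative).

-- ===== PORT A =====
-- the while loop: C grows until len(C) = len(A); x is Python's running index (an int)
def solutionLoop (a b c : List Char) (x : Int) : List Char :=
  if c.length < a.length then
    match PySem.List.pyGet? a x with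
    | none => c              -- unreachable: x is always in range when the loop runs
    | some ax =>
      let c1 := c ++ [ax]
      if c1.length < a.length then
        match PySem.List.pyGet? b x with
        | none => c1         -- unreachable
        | some bx => solutionLoop a b (c1 ++ [bx]) (x + 1)
      else solutionLoop a b c1 (x + 1)
  else c
termination_by a.length - c.length
decreasing_by
  · simp only [List.length_append, List.length_singleton]; omega
  · simp only [List.length_append, List.length_singleton]; omega

def solution (A : Int) : Int :=
  let a := PySem.Int.toChars A                                  -- A = list(str(A))
  let b := (PySem.List.slice? a none none (-1)).getD []         -- B = A[::-1] (step -1 never raises)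
  let c := solutionLoop a b [] 0
  -- s = [str(i) for i in C] maps 1-char strings to themselves, so "".join(s) is just C
  (PySem.Int.ofChars? c).getD 0                                 -- int(...): always a valid literal here

-- ===== PORT B =====
-- riffle(s): 'if len(s) <= 1: return s' = the first two cases; on c :: d :: t,
-- s[0] = c, s[-1] = (d::t).getLast, s[1:-1] = (d::t).dropLast — exact for in-range slices
def riffle : List Char → List Char
  | [] => []
  | [c] => [c]
  | c :: d :: t => c :: (d :: t).getLast (by simp) :: riffle ((d :: t).dropLast)
termination_by s => s.length
decreasing_by simp

def solution_alt (A : Int) : Int :=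
  (PySem.Int.ofChars? (riffle (PySem.Int.toChars A))).getD 0    -- int(riffle(str(A)))

-- ===== PRECONDITION & SPEC =====
def Spec_solution (A : Int) (out : Int) : Prop := out = solution_alt A
instance (A : Int) (out : Int) : Decidable (Spec_solution A out) := by unfold Spec_solution; infer_instance

-- ===== CLAIM (what is proved, stated in full; the proofs are below) =====
def Claim_equal_solution : Prop := ∀ (A : Int), Dom_solution A → Spec_solution A (solution A)

-- ===== LEMMAS AND PROOFS =====

-- the common target: first n chars of the full a/b interleaving
def interTake (a b : List Char) : List Char :=
  (((List.range a.length).flatMap fun i => [a.getD i ' ', b.getD i ' ']).take a.length)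

lemma flat2_length (u v : Nat → Char) (n : Nat) :
    ((List.range n).flatMap fun k => [u k, v k]).length = 2 * n := by
  induction n with
  | zero => simp
  | succ n ih => simp [List.range_succ, ih]; omega

lemma flat2_getD (u v : Nat → Char) (n j : Nat) (hj : j < 2 * n) :
    ((List.range n).flatMap fun k => [u k, v k]).getD j ' ' =
      if j % 2 = 0 then u (j / 2) else v (j / 2) := by
  induction n with
  | zero => omega
  | succ n ih =>
    rw [List.range_succ, List.flatMap_append]
    by_cases h : j < 2 * n
    · rw [List.getD_append _ _ _ _ (by rw [flat2_length]; omega)]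
      exact ih h
    · have hlen : ((List.range n).flatMap fun k => [u k, v k]).length = 2 * n :=
        flat2_length u v n
      rcases (by omega : j = 2 * n ∨ j = 2 * n + 1) with hj2 | hj2
      · subst hj2
        rw [List.getD_append_right _ _ _ _ hlen.le, hlen]
        have h2 : (2 * n) / 2 = n := by omega
        have h3 : (2 * n) % 2 = 0 := by omega
        rw [h2, h3]
        simp
      · subst hj2
        rw [List.getD_append_right _ _ _ _ (hlen.le.trans (by omega)), hlen]
        have h1 : 2 * n + 1 - 2 * n = 1 := by omega
        have h2 : (2 * n + 1) / 2 = n := by omega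
        have h3 : (2 * n + 1) % 2 = 1 := by omega
        rw [h1, h2, h3]
        simp

lemma interTake_length (a b : List Char) : (interTake a b).length = a.length := by
  unfold interTake
  rw [List.length_take, flat2_length]; omega

lemma interTake_getD (a b : List Char) (j : Nat) (hj : j < a.length) :
    (interTake a b).getD j ' ' = if j % 2 = 0 then a.getD (j / 2) ' ' else b.getD (j / 2) ' ' := by
  unfold interTake
  rw [List.getD_eq_getElem _ _ (by rw [List.length_take, flat2_length]; omega),
      List.getElem_take, ← List.getD_eq_getElem _ ' ' (by rw [flat2_length]; omega)]
  exact flat2_getD _ _ _ _ (by omega)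

lemma loop_spec (a b : List Char) (hb : b.length = a.length) :
    ∀ k c (m : Nat), c.length = 2 * m → a.length - c.length = k →
      solutionLoop a b c (m : Int) = c ++ (interTake a b).drop (2 * m) := by
  intro k
  induction k using Nat.strong_induction_on with
  | _ k ih =>
    intro c m hc hk
    by_cases h : c.length < a.length
    · have hm : m < a.length := by omega
      rw [solutionLoop, if_pos h, PySem.List.pyGet?_natCast,
          List.getElem?_eq_getElem hm]
      simp only
      have hu : a[m] = a.getD m ' ' := (List.getD_eq_getElem a ' ' hm).symm
      by_cases h2 : (c ++ [a[m]]).length < a.length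
      · have hm' : m < b.length := by omega
        rw [if_pos h2, PySem.List.pyGet?_natCast, List.getElem?_eq_getElem hm']
        simp only
        have hv : b[m] = b.getD m ' ' := (List.getD_eq_getElem b ' ' hm').symm
        have hcast : (m : Int) + 1 = ((m + 1 : Nat) : Int) := by push_cast; ring
        rw [hcast, ih (a.length - ((c ++ [a[m]] ++ [b[m]]).length))
              (by simp at h2 ⊢; omega) _ _ (by simp; omega) rfl]
        have hdrop : (interTake a b).drop (2 * m) =
            a.getD m ' ' :: b.getD m ' ' :: (interTake a b).drop (2 * (m + 1)) := by
          rw [List.drop_eq_getElem_cons (by rw [interTake_length]; simp at h2; omega),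
              List.drop_eq_getElem_cons (by rw [interTake_length]; simp at h2; omega)]
          rw [← List.getD_eq_getElem _ ' ', ← List.getD_eq_getElem _ ' ',
              interTake_getD a b _ (by simp at h2; omega),
              interTake_getD a b _ (by simp at h2; omega)]
          rw [if_pos (by omega), if_neg (by omega),
              show 2 * m / 2 = m from by omega, show (2 * m + 1) / 2 = m from by omega]
          norm_num; omega
        rw [hdrop, hu, hv]; simp
      · rw [if_neg h2]
        rw [solutionLoop, if_neg (by simp at h2 ⊢; omega)]
        have hlen : a.length = 2 * m + 1 := by simp at h2; omega
        have hdrop : (interTake a b).drop (2 * m) = [a.getD m ' '] := by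
          rw [List.drop_eq_getElem_cons (by rw [interTake_length]; omega)]
          have : (interTake a b).drop (2 * m + 1) = [] :=
            List.drop_eq_nil_of_le (by rw [interTake_length]; omega)
          rw [this, ← List.getD_eq_getElem _ ' ', interTake_getD a b _ (by omega),
              if_pos (by omega), show 2 * m / 2 = m from by omega]
        rw [hdrop, hu]
    · rw [solutionLoop, if_neg h]
      have : (interTake a b).drop (2 * m) = [] :=
        List.drop_eq_nil_of_le (by rw [interTake_length]; omega)
      rw [this, List.append_nil]

lemma riffle_nil : riffle [] = [] := by rw [riffle.eq_def]
lemma riffle_one (c : Char) : riffle [c] = [c] := by rw [riffle.eq_def]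
lemma riffle_cons2 (c d : Char) (t : List Char) :
    riffle (c :: d :: t) = c :: (d :: t).getLast (by simp) :: riffle ((d :: t).dropLast) := by
  rw [riffle.eq_def]

lemma riffle_length_aux : ∀ (n : Nat) (s : List Char), s.length ≤ n → (riffle s).length = s.length := by
  intro n
  induction n with
  | zero =>
    intro s hs
    match s with
    | [] => rw [riffle_nil]
    | c :: t => simp at hs
  | succ n ih =>
    intro s hs
    match s with
    | [] => rw [riffle_nil]
    | [c] => rw [riffle_one]
    | c :: d :: t =>
      rw [riffle_cons2]
      simp only [List.length_cons]
      rw [ih ((d :: t).dropLast) (by simp at hs ⊢; omega)]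
      simp

lemma riffle_length (s : List Char) : (riffle s).length = s.length :=
  riffle_length_aux s.length s le_rfl

lemma riffle_getD_aux : ∀ (n : Nat) (s : List Char), s.length ≤ n → ∀ (j : Nat), j < s.length →
    (riffle s).getD j ' ' =
      if j % 2 = 0 then s.getD (j / 2) ' ' else s.getD (s.length - 1 - j / 2) ' ' := by
  intro n
  induction n with
  | zero => intro s hs j hj; omega
  | succ n ih =>
    intro s hs j hj
    match s with
    | [] => simp at hj
    | [c] =>
      have : j = 0 := by simp at hj; omega
      subst this; simp [riffle_one]
    | c :: d :: t =>
      rw [riffle_cons2]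
      match j with
      | 0 => simp
      | 1 =>
        simp only [List.getD_cons_succ, List.getD_cons_zero]
        rw [if_neg (by omega)]
        have h1 : (1 : Nat) / 2 = 0 := by norm_num
        have h2 : (c :: d :: t).length - 1 - 0 = t.length + 1 := by simp
        rw [h1, h2, List.getD_cons_succ, List.getD_eq_getElem _ _ (by simp),
            List.getLast_eq_getElem]
        congr 1
      | (j + 2) =>
        simp only [List.getD_cons_succ]
        have hlen : ((d :: t).dropLast).length = t.length := by simp
        have hjm : j < ((d :: t).dropLast).length := by simp at hj ⊢; omega
        rw [ih ((d :: t).dropLast) (by simp at hs ⊢; omega) j hjm, hlen]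
        have hmid : ∀ k, k < t.length → ((d :: t).dropLast).getD k ' ' = (c :: d :: t).getD (k + 1) ' ' := by
          intro k hk
          rw [List.getD_eq_getElem _ _ (by simp only [List.length_dropLast, List.length_cons]; omega),
              List.getElem_dropLast, List.getD_cons_succ,
              List.getD_eq_getElem _ _ (by simp only [List.length_cons]; omega)]
        by_cases hp : j % 2 = 0
        · rw [if_pos hp, if_pos (by omega)]
          rw [hmid (j / 2) (by omega)]
          congr 1; omega
        · rw [if_neg hp, if_neg (by omega)]
          rw [hmid (t.length - 1 - j / 2) (by omega)]
          congr 1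
          simp only [List.length_cons]
          omega

lemma riffle_getD (s : List Char) (j : Nat) (hj : j < s.length) :
    (riffle s).getD j ' ' =
      if j % 2 = 0 then s.getD (j / 2) ' ' else s.getD (s.length - 1 - j / 2) ' ' :=
  riffle_getD_aux s.length s le_rfl j hj

lemma riffle_eq_interTake (a : List Char) : riffle a = interTake a a.reverse := by
  apply List.ext_getElem (by rw [riffle_length, interTake_length])
  intro i h1 h2
  rw [← List.getD_eq_getElem _ ' ', ← List.getD_eq_getElem _ ' ']
  have hi : i < a.length := by rwa [riffle_length] at h1
  rw [riffle_getD a i hi, interTake_getD a a.reverse i hi]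
  by_cases hp : i % 2 = 0
  · rw [if_pos hp, if_pos hp]
  · rw [if_neg hp, if_neg hp]
    rw [List.getD_eq_getElem?_getD, List.getD_eq_getElem?_getD,
        List.getElem?_reverse (by omega)]

-- ===== VERDICT (by name: the statement is the Claim_ definition above) =====
theorem solution_spec : Claim_equal_solution := by
  intro A _
  unfold Spec_solution solution solution_alt
  simp only [PySem.List.slice?_none_none_neg_one, Option.getD_some]
  have h := loop_spec (PySem.Int.toChars A) (PySem.Int.toChars A).reverse (by simp)
    (PySem.Int.toChars A).length [] 0 (by simp) (by simp)
  norm_num at h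
  rw [h, riffle_eq_interTake]
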